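-- pv_equiv track=rewrite | github.com/PerezSJuan/Flet-base | flet_base/keyboard_shortcuts/shortcuts.py | _order_parts
-- ===== SOURCE A (Python) =====
-- from typing import Callable, Dict, List
--
-- def _order_parts(parts: List[str]) -> str:
--     """Orders parts for consistent comparison."""
--     priority = {"ctrl": 0, "alt": 1, "shift": 2, "meta": 3}
--     modifiers = [p for p in parts if p in priority]
--     keys = [p for p in parts if p not in priority]
--
--     modifiers.sort(key=lambda x: priority[x])
--     keys.sort()
--
--     unique_parts = []
--     seen = set()
--     for p in modifiers + keys:
--         if p and p not in seen:
--             unique_parts.append(p)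
--             seen.add(p)
--     return "+".join(unique_parts)
-- ===== SOURCE B (Python) =====
-- from typing import List
--
-- def _order_parts(parts: List[str]) -> str:
--     """Orders parts for consistent comparison."""
--     rank = {"ctrl": 0, "alt": 1, "shift": 2, "meta": 3}
--     ordered = sorted(parts, key=lambda p: (rank.get(p, 4), p))
--     return "+".join(dict.fromkeys(p for p in ordered if p))
-- ===== Notes on version B (the rewrite author's own statement) =====
-- stated objective: idiomatic
-- what changed: Replaces the partition-into-two-lists plus two separate sorts plus an explicit seen-set dedup loop by one compound-key sort over the whole list ((modifier-priority, name) tuples) followed by dict.fromkeys for ordered dedup of the truthy parts.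
import Mathlib
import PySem

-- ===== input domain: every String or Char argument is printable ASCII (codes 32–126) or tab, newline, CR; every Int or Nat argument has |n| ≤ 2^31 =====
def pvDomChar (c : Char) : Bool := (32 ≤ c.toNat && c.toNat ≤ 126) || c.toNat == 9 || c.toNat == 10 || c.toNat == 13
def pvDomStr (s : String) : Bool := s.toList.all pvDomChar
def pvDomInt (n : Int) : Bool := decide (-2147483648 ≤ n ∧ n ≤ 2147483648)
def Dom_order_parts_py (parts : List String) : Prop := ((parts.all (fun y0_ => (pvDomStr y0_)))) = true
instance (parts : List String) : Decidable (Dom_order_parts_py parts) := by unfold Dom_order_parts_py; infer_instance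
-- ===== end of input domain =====

-- B replaces A's partition + two separate sorts + explicit seen-set loop by one compound-key sort
-- followed by dict.fromkeys dedup of the truthy parts (objective: idiomatic; same result).

-- ===== PORT A =====
-- priority = {"ctrl": 0, "alt": 1, "shift": 2, "meta": 3}
def pvPriorityA : PySem.Dict String Int := PySem.Dict.mk [("ctrl", 0), ("alt", 1), ("shift", 2), ("meta", 3)]

-- loop body: 'if p and p not in seen: unique_parts.append(p); seen.add(p)'
def pvDedupStepA (st : List String × PySem.Set String) (p : String) : List String × PySem.Set String :=
  if (p != "") && !(st.2.contains p) then (st.1 ++ [p], st.2.add p) else st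

def order_parts_py (parts : List String) : String :=
  let modifiers := parts.filter (fun p => pvPriorityA.contains p)
  let keys := parts.filter (fun p => !pvPriorityA.contains p)
  -- 'modifiers.sort(key=lambda x: priority[x])': every x in modifiers is a key of priority, so getD 0 is exact
  let modifiersS := PySem.List.sorted modifiers (fun x => pvPriorityA.getD x 0) false
  -- 'keys.sort()': Python string '<' = lexicographic on code points = 'List Char' order (exact on the ASCII domain)
  let keysS := PySem.List.sorted keys (fun x => x.toList) false
  let st := (modifiersS ++ keysS).foldl pvDedupStepA ([], PySem.Set.empty)
  PySem.Str.join "+" st.1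

-- ===== PORT B =====
-- rank = {"ctrl": 0, "alt": 1, "shift": 2, "meta": 3}
def pvRankB : PySem.Dict String Int := PySem.Dict.mk [("ctrl", 0), ("alt", 1), ("shift", 2), ("meta", 3)]

def order_parts_py_alt (parts : List String) : String :=
  -- 'sorted(parts, key=lambda p: (rank.get(p, 4), p))'; tuple key via sorted2, string '<' as 'List Char' order
  let ordered := PySem.List.sorted2 parts (fun p => pvRankB.getD p 4) (fun p => p.toList) false
  -- '"+".join(dict.fromkeys(p for p in ordered if p))'
  PySem.Str.join "+" (PySem.List.dedup (ordered.filter (fun p => p != "")))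

-- ===== PRECONDITION & SPEC =====
def Spec_order_parts_py (parts : List String) (out : String) : Prop := out = order_parts_py_alt parts
instance (parts : List String) (out : String) : Decidable (Spec_order_parts_py parts out) := by unfold Spec_order_parts_py; infer_instance

-- ===== CLAIM (what is proved, stated in full; the proofs are below) =====
def Claim_equal_order_parts_py : Prop := ∀ (parts : List String), Dom_order_parts_py parts → Spec_order_parts_py parts (order_parts_py parts)

-- ===== LEMMAS AND PROOFS =====

-- B's compound comparison, as sorted2 unfolds it
def pvLt2 (a b : String) : Bool :=
  decide (pvRankB.getD a 4 < pvRankB.getD b 4) ||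
    (!decide (pvRankB.getD b 4 < pvRankB.getD a 4) && decide (a.toList < b.toList))

lemma pvContains_iff (p : String) :
    pvPriorityA.contains p = true ↔ (p = "ctrl" ∨ p = "alt" ∨ p = "shift" ∨ p = "meta") := by
  rw [PySem.Dict.contains_eq_decide_mem_keys]
  simp [pvPriorityA, PySem.Dict.keys_mk]

lemma pvRank_four {p : String} (h : pvPriorityA.contains p = false) : pvRankB.getD p 4 = 4 := by
  have h' : pvRankB.contains p = false := h
  exact PySem.Dict.getD_of_not_contains _ _ h'

lemma pvLt2_mod_mod {x y : String} (hx : pvPriorityA.contains x = true)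
    (hy : pvPriorityA.contains y = true) :
    pvLt2 x y = decide (pvPriorityA.getD x 0 < pvPriorityA.getD y 0) := by
  rw [pvContains_iff] at hx hy
  rcases hx with rfl | rfl | rfl | rfl <;> rcases hy with rfl | rfl | rfl | rfl <;> decide

lemma pvLt2_mod_key {x y : String} (hx : pvPriorityA.contains x = true)
    (hy : pvPriorityA.contains y = false) : pvLt2 x y = true := by
  have h4 := pvRank_four hy
  rw [pvContains_iff] at hx
  rcases hx with rfl | rfl | rfl | rfl <;> simp [pvLt2, h4] <;> exact Or.inl (by decide)

lemma pvLt2_key_mod {x y : String} (hx : pvPriorityA.contains x = false)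
    (hy : pvPriorityA.contains y = true) : pvLt2 x y = false := by
  have h4 := pvRank_four hx
  rw [pvContains_iff] at hy
  rcases hy with rfl | rfl | rfl | rfl <;> simp [pvLt2, h4] <;>
    exact ⟨by decide, fun h => absurd h (by decide)⟩

lemma pvLt2_key_key {x y : String} (hx : pvPriorityA.contains x = false)
    (hy : pvPriorityA.contains y = false) : pvLt2 x y = decide (x.toList < y.toList) := by
  simp [pvLt2, pvRank_four hx, pvRank_four hy]

lemma pvInsertBy_nil (c : String → String → Bool) (x : String) :
    PySem.List.insertBy c x [] = [x] := rfl

lemma pvInsertBy_cons (c : String → String → Bool) (x y : String) (ys : List String) :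
    PySem.List.insertBy c x (y :: ys) =
      if c x y then x :: y :: ys else y :: PySem.List.insertBy c x ys := rfl

lemma pvInsertBy_congr (c c' : String → String → Bool) (x : String) (K : List String)
    (hK : ∀ y ∈ K, c x y = c' x y) :
    PySem.List.insertBy c x K = PySem.List.insertBy c' x K := by
  induction K with
  | nil => rfl
  | cons k ks ih =>
    have hk := hK k (by simp)
    rw [pvInsertBy_cons, pvInsertBy_cons, hk, ih (fun y hy => hK y (by simp [hy]))]

lemma pvInsertBy_left (c c' : String → String → Bool) (x : String) (M K : List String)
    (hM : ∀ y ∈ M, c x y = c' x y) (hK : ∀ y ∈ K, c x y = true) :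
    PySem.List.insertBy c x (M ++ K) = PySem.List.insertBy c' x M ++ K := by
  induction M with
  | nil =>
    cases K with
    | nil => rfl
    | cons k ks =>
      simp [pvInsertBy_cons, pvInsertBy_nil, hK k (by simp)]
  | cons m ms ih =>
    have hm := hM m (by simp)
    rw [List.cons_append, pvInsertBy_cons, pvInsertBy_cons, ← hm]
    by_cases h : c x m = true
    · simp [h]
    · have hb : c x m = false := by simpa using h
      simp only [hb, Bool.false_eq_true, if_false, List.cons_append]
      rw [ih (fun y hy => hM y (by simp [hy]))]

lemma pvInsertBy_right (c : String → String → Bool) (x : String) (M K : List String)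
    (hM : ∀ y ∈ M, c x y = false) :
    PySem.List.insertBy c x (M ++ K) = M ++ PySem.List.insertBy c x K := by
  induction M with
  | nil => rfl
  | cons m ms ih =>
    have hb := hM m (by simp)
    rw [List.cons_append, pvInsertBy_cons, hb]
    simp only [Bool.false_eq_true, if_false, List.cons_append]
    rw [ih (fun y hy => hM y (by simp [hy]))]

lemma pvSorted2_foldl (parts : List String) :
    PySem.List.sorted2 parts (fun p => pvRankB.getD p 4) (fun p => p.toList) false =
      parts.foldl (fun acc x => PySem.List.insertBy pvLt2 x acc) [] := rfl

-- the compound sort equals (modifiers sorted by priority) ++ (keys sorted alphabetically)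
lemma pvMain (parts : List String) :
    PySem.List.sorted2 parts (fun p => pvRankB.getD p 4) (fun p => p.toList) false =
      PySem.List.sorted (parts.filter (fun p => pvPriorityA.contains p)) (fun x => pvPriorityA.getD x 0) false ++
      PySem.List.sorted (parts.filter (fun p => !pvPriorityA.contains p)) (fun x => x.toList) false := by
  induction parts using List.reverseRecOn with
  | nil => rfl
  | append_singleton ps x ih =>
    have hmemM : ∀ y ∈ PySem.List.sorted (ps.filter (fun p => pvPriorityA.contains p)) (fun x => pvPriorityA.getD x 0) false,
        pvPriorityA.contains y = true := by
      intro y hy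
      rw [PySem.List.mem_sorted] at hy
      exact (List.mem_filter.1 hy).2
    have hmemK : ∀ y ∈ PySem.List.sorted (ps.filter (fun p => !pvPriorityA.contains p)) (fun x => x.toList) false,
        pvPriorityA.contains y = false := by
      intro y hy
      rw [PySem.List.mem_sorted] at hy
      simpa using (List.mem_filter.1 hy).2
    rw [pvSorted2_foldl, List.foldl_append, List.foldl_cons, List.foldl_nil, ← pvSorted2_foldl]
    rw [ih, List.filter_append, List.filter_append]
    by_cases hx : pvPriorityA.contains x = true
    · have hfm : List.filter (fun p => pvPriorityA.contains p) [x] = [x] := by simp [hx]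
      have hfk : List.filter (fun p => !pvPriorityA.contains p) [x] = [] := by simp [hx]
      rw [hfm, hfk, List.append_nil]
      rw [PySem.List.sorted_eq_foldl_insertBy (ps.filter (fun p => pvPriorityA.contains p) ++ [x]),
          List.foldl_append, ← PySem.List.sorted_eq_foldl_insertBy]
      simp only [List.foldl_cons, List.foldl_nil]
      exact pvInsertBy_left _ _ _ _ _
        (fun y hy => pvLt2_mod_mod hx (hmemM y hy))
        (fun y hy => pvLt2_mod_key hx (hmemK y hy))
    · have hx' : pvPriorityA.contains x = false := by simpa using hx
      have hfm : List.filter (fun p => pvPriorityA.contains p) [x] = [] := by simp [hx']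
      have hfk : List.filter (fun p => !pvPriorityA.contains p) [x] = [x] := by simp [hx']
      rw [hfm, hfk, List.append_nil]
      rw [PySem.List.sorted_eq_foldl_insertBy (ps.filter (fun p => !pvPriorityA.contains p) ++ [x]),
          List.foldl_append, ← PySem.List.sorted_eq_foldl_insertBy]
      simp only [List.foldl_cons, List.foldl_nil]
      rw [pvInsertBy_right _ _ _ _ (fun y hy => pvLt2_key_mod hx' (hmemM y hy))]
      exact congrArg _ (pvInsertBy_congr _ _ _ _ (fun y hy => pvLt2_key_key hx' (hmemK y hy)))

-- A's dedup loop computes dict.fromkeys of the truthy parts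
lemma pvFold_pair (L : List String) : ∀ u : List String,
    L.foldl pvDedupStepA (u, u) =
      ((L.filter (fun p => p != "")).foldl PySem.Set.add u,
       (L.filter (fun p => p != "")).foldl PySem.Set.add u) := by
  induction L with
  | nil => intro u; rfl
  | cons p L ih =>
    intro u
    by_cases hp : p = ""
    · subst hp
      simpa [pvDedupStepA] using ih u
    · have hne : (p != "") = true := by simpa using hp
      have hstep : pvDedupStepA (u, u) p = (PySem.Set.add u p, PySem.Set.add u p) := by
        by_cases hc : p ∈ u <;> simp [pvDedupStepA, hne, hc, PySem.Set.add]
      simp only [List.foldl_cons, List.filter_cons, hne, if_pos trivial, hstep]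
      exact ih _

lemma pvLoop_eq (L : List String) :
    (L.foldl pvDedupStepA ([], PySem.Set.empty)).1 =
      PySem.List.dedup (L.filter (fun p => p != "")) := by
  have h := pvFold_pair L []
  rw [show (PySem.Set.empty : PySem.Set String) = ([] : List String) from rfl, h]
  rfl

-- ===== VERDICT (by name: the statement is the Claim_ definition above) =====
theorem order_parts_py_spec : Claim_equal_order_parts_py := by
  intro parts _hdom
  show order_parts_py parts = order_parts_py_alt parts
  simp only [order_parts_py, order_parts_py_alt]
  rw [pvLoop_eq, pvMain]
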